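-- pv_equiv track=rewrite | github.com/carealisa1/AI-article-generator | image_engine.py | _optimize_prompt_length
-- ===== SOURCE A (Python) =====
-- def _optimize_prompt_length(prompt: str, max_length: int) -> str:
--     """
--     Optimize prompt length while preserving key elements
--     """
--
--     if len(prompt) <= max_length:
--         return prompt
--
--     # Split by commas and prioritize sections
--     sections = [s.strip() for s in prompt.split(',')]
--
--     # Priority order: subject, context, style, technical specs
--     essential_sections = sections[:3]  # Keep first 3 sections
--     optional_sections = sections[3:]
--
--     # Rebuild with essential sections first
--     optimized = ', '.join(essential_sections)
--
--     # Add optional sections if space allows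
--     for section in optional_sections:
--         if len(optimized) + len(section) + 2 <= max_length:  # +2 for ', '
--             optimized += f', {section}'
--         else:
--             break
--
--     return optimized
-- ===== SOURCE B (Python) =====
-- def _optimize_prompt_length(prompt: str, max_length: int) -> str:
--     if len(prompt) <= max_length:
--         return prompt
--     sections = [s.strip() for s in prompt.split(',')]
--     essentials = sections[:3]
--     optional = sections[3:]
--     budget = max_length - len(', '.join(essentials))
--     costs = []
--     cum = 0
--     for s in optional:
--         cum += len(s) + 2
--         costs.append(cum)
--     k = sum(1 for c in costs if c <= budget)
--     return ', '.join(essentials + optional[:k])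
-- ===== Notes on version B (the rewrite author's own statement) =====
-- stated objective: alternative
-- what changed: A's concatenate-test-break loop over the optional sections is replaced by a prefix-sum pass that builds cumulative section costs, counts how many fit in the remaining budget, and joins essentials plus that slice once at the end.
import Mathlib
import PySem

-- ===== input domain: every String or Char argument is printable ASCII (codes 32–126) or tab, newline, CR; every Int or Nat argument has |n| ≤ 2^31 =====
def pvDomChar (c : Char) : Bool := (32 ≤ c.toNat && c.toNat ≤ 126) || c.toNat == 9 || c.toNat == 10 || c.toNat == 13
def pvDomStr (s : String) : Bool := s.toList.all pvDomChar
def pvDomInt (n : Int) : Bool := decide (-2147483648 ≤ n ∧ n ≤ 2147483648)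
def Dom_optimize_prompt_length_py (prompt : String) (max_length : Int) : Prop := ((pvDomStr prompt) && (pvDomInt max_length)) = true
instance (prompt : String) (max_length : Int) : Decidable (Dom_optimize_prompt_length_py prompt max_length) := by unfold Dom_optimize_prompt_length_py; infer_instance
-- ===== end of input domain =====

-- B replaces A's concatenate-test-break loop by a prefix-sum of section costs and a
-- count-then-slice (objective: alternative decomposition, same cost).

-- ===== PORT A =====
-- the for-loop over optional_sections; 'optimized += f', {section}'' is ported as
-- joining the three pieces (exact: Python string concatenation)
def pyOptLoopA (max_length : Int) : List String → String → String
  | [], optimized => optimized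
  | s :: rest, optimized =>
    if PySem.Str.len optimized + PySem.Str.len s + 2 ≤ max_length then
      pyOptLoopA max_length rest (PySem.Str.join "" [optimized, ", ", s])
    else optimized

def optimize_prompt_length_py (prompt : String) (max_length : Int) : String :=
  if PySem.Str.len prompt ≤ max_length then prompt
  else
    -- prompt.split(','): separator is the nonempty literal ',', so split? is always some
    let sections := ((PySem.Str.split? prompt ",").getD []).map PySem.Str.strip
    let essential_sections := PySem.List.slice sections none (some 3)
    let optional_sections := PySem.List.slice sections (some 3) none
    let optimized := PySem.Str.join ", " essential_sections
    pyOptLoopA max_length optional_sections optimized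

-- ===== PORT B =====
def optimize_prompt_length_py_alt (prompt : String) (max_length : Int) : String :=
  if PySem.Str.len prompt ≤ max_length then prompt
  else
    -- prompt.split(','): separator is the nonempty literal ',', so split? is always some
    let sections := ((PySem.Str.split? prompt ",").getD []).map PySem.Str.strip
    let essentials := PySem.List.slice sections none (some 3)
    let optional := PySem.List.slice sections (some 3) none
    let budget := max_length - PySem.Str.len (PySem.Str.join ", " essentials)
    -- the costs-building loop: state = (cum, costs)
    let costs := (optional.foldl
      (fun (st : Int × List Int) s =>
        (st.1 + PySem.Str.len s + 2, st.2 ++ [st.1 + PySem.Str.len s + 2]))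
      ((0 : Int), ([] : List Int))).2
    -- k = sum(1 for c in costs if c <= budget)
    let k : Int := ((costs.filter (fun c => decide (c ≤ budget))).length : Int)
    PySem.Str.join ", " (essentials ++ PySem.List.slice optional none (some k))

-- ===== PRECONDITION & SPEC =====
def Spec_optimize_prompt_length_py (prompt : String) (max_length : Int) (out : String) : Prop := out = optimize_prompt_length_py_alt prompt max_length
instance (prompt : String) (max_length : Int) (out : String) : Decidable (Spec_optimize_prompt_length_py prompt max_length out) := by unfold Spec_optimize_prompt_length_py; infer_instance

-- ===== CLAIM (what is proved, stated in full; the proofs are below) =====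
def Claim_equal_optimize_prompt_length_py : Prop := ∀ (prompt : String) (max_length : Int), Dom_optimize_prompt_length_py prompt max_length → Spec_optimize_prompt_length_py prompt max_length (optimize_prompt_length_py prompt max_length)

-- ===== LEMMAS AND PROOFS =====

-- splitOn's fuel loop never produces the empty list
lemma pvGoNeNil (sep : List Char) : ∀ (fuel : Nat) (l cur : List Char) (acc : List (List Char)),
    PySem.Chars.splitOn.go sep fuel l cur acc ≠ [] := by
  intro fuel
  induction fuel with
  | zero => intro l cur acc; simp [PySem.Chars.splitOn.go]
  | succ n ih =>
    intro l cur acc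
    cases l with
    | nil => simp [PySem.Chars.splitOn.go]
    | cons c rest =>
      rw [PySem.Chars.splitOn.go.eq_def]
      split
      · simp
      · simp
      · rename_i fuel c' rest' heq1 heq2
        obtain rfl : fuel = n := by omega
        split_ifs
        · exact ih _ _ _
        · exact ih _ _ _

lemma pvSplitOnNeNil (s sep : List Char) : PySem.Chars.splitOn s sep ≠ [] :=
  pvGoNeNil sep _ s [] []

-- join over a snoc, at the character level
lemma pvJoinSnoc (sep q : List Char) : ∀ (ps : List (List Char)), ps ≠ [] →
    PySem.Chars.join sep (ps ++ [q]) = PySem.Chars.join sep ps ++ sep ++ q := by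
  intro ps
  induction ps with
  | nil => intro h; exact absurd rfl h
  | cons p rest ih =>
    intro _
    cases rest with
    | nil => simp [PySem.Chars.join_cons_cons, PySem.Chars.join_singleton]
    | cons p' rest' =>
      have h2 := ih (by simp)
      rw [List.cons_append] at h2
      show PySem.Chars.join sep (p :: p' :: (rest' ++ [q])) = _
      rw [PySem.Chars.join_cons_cons, h2, PySem.Chars.join_cons_cons]
      simp [List.append_assoc]

-- the same, lifted to strings: join ", " (es ++ [s]) is the three-piece concatenation
lemma pvJoinSnocStr (es : List String) (hne : es ≠ []) (s : String) :
    PySem.Str.join ", " (es ++ [s]) = PySem.Str.join "" [PySem.Str.join ", " es, ", ", s] := by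
  rw [← String.toList_inj]
  simp only [PySem.Str.toList_join, List.map_append, List.map_cons, List.map_nil]
  rw [pvJoinSnoc _ _ _ (by simpa using hne)]
  simp [PySem.Chars.join_cons_cons, PySem.Chars.join_singleton]

lemma pvLenJoinSnoc (es : List String) (hne : es ≠ []) (s : String) :
    PySem.Str.len (PySem.Str.join ", " (es ++ [s]))
      = PySem.Str.len (PySem.Str.join ", " es) + 2 + PySem.Str.len s := by
  rw [pvJoinSnocStr es hne s]
  simp [PySem.Str.len, PySem.Str.toList_join, PySem.Chars.join_cons_cons,
    PySem.Chars.join_singleton]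
  omega

-- how many optional sections fit into budget b (recursive characterisation)
def pvNFit : Int → List String → Nat
  | _, [] => 0
  | b, s :: r => if PySem.Str.len s + 2 ≤ b then pvNFit (b - (PySem.Str.len s + 2)) r + 1 else 0

-- the cumulative-cost list B's fold builds, as a recursion
def pvCostsFrom : Int → List String → List Int
  | _, [] => []
  | c, s :: r => (c + PySem.Str.len s + 2) :: pvCostsFrom (c + PySem.Str.len s + 2) r

lemma pvFoldCosts (l : List String) : ∀ (c : Int) (acc : List Int),
    (l.foldl (fun (st : Int × List Int) s =>
        (st.1 + PySem.Str.len s + 2, st.2 ++ [st.1 + PySem.Str.len s + 2])) (c, acc)).2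
      = acc ++ pvCostsFrom c l := by
  induction l with
  | nil => intro c acc; simp [pvCostsFrom]
  | cons s r ih =>
    intro c acc
    show (r.foldl _ (c + PySem.Str.len s + 2, acc ++ [c + PySem.Str.len s + 2])).2 = _
    rw [ih]
    show (acc ++ [c + PySem.Str.len s + 2]) ++ pvCostsFrom (c + PySem.Str.len s + 2) r
       = acc ++ pvCostsFrom c (s :: r)
    rw [List.append_assoc]
    rfl

lemma pvCostsLB (l : List String) : ∀ (c x : Int), x ∈ pvCostsFrom c l → c < x := by
  induction l with
  | nil => intro c x h; simp [pvCostsFrom] at h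
  | cons s r ih =>
    intro c x h
    simp only [pvCostsFrom, List.mem_cons] at h
    have hs : (0 : Int) ≤ PySem.Str.len s := by simp [PySem.Str.len]
    rcases h with h | h
    · omega
    · have := ih _ _ h; omega

lemma pvCountEqNFit (l : List String) : ∀ (c b : Int),
    ((pvCostsFrom c l).filter (fun x => decide (x ≤ b))).length = pvNFit (b - c) l := by
  induction l with
  | nil => intro c b; rfl
  | cons s r ih =>
    intro c b
    show (((c + PySem.Str.len s + 2) :: pvCostsFrom (c + PySem.Str.len s + 2) r).filter
        (fun x => decide (x ≤ b))).length = pvNFit (b - c) (s :: r)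
    rw [List.filter_cons]
    by_cases h : c + PySem.Str.len s + 2 ≤ b
    · rw [if_pos (by simpa using h)]
      rw [List.length_cons, ih]
      show _ = pvNFit (b - c) (s :: r)
      simp only [pvNFit]
      rw [if_pos (by omega : PySem.Str.len s + 2 ≤ b - c)]
      have harg : b - (c + PySem.Str.len s + 2) = b - c - (PySem.Str.len s + 2) := by ring
      rw [harg]
    · rw [if_neg (by simpa using h)]
      have hnil : (pvCostsFrom (c + PySem.Str.len s + 2) r).filter (fun x => decide (x ≤ b)) = [] := by
        rw [List.filter_eq_nil_iff]
        intro x hx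
        have hlb := pvCostsLB r _ x hx
        simp only [decide_eq_true_eq]
        omega
      rw [hnil]
      simp only [pvNFit]
      rw [if_neg (by omega : ¬ PySem.Str.len s + 2 ≤ b - c)]
      rfl

-- A's loop, run from the join of a nonempty prefix, yields the join of that prefix
-- extended by exactly the sections pvNFit counts
lemma pvLoopAEq (l : List String) : ∀ (es : List String), es ≠ [] → ∀ (ml : Int),
    pyOptLoopA ml l (PySem.Str.join ", " es)
      = PySem.Str.join ", " (es ++ l.take (pvNFit (ml - PySem.Str.len (PySem.Str.join ", " es)) l)) := by
  induction l with
  | nil => intro es _ ml; simp [pyOptLoopA, pvNFit]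
  | cons s r ih =>
    intro es hne ml
    simp only [pyOptLoopA, pvNFit]
    by_cases h : PySem.Str.len (PySem.Str.join ", " es) + PySem.Str.len s + 2 ≤ ml
    · have hcond : PySem.Str.len s + 2 ≤ ml - PySem.Str.len (PySem.Str.join ", " es) := by omega
      rw [if_pos h, if_pos hcond]
      rw [← pvJoinSnocStr es hne s]
      rw [ih (es ++ [s]) (by simp) ml]
      rw [pvLenJoinSnoc es hne s]
      have : ml - (PySem.Str.len (PySem.Str.join ", " es) + 2 + PySem.Str.len s)
           = ml - PySem.Str.len (PySem.Str.join ", " es) - (PySem.Str.len s + 2) := by ring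
      rw [this]
      simp [List.take_succ_cons]
    · have hcond : ¬ (PySem.Str.len s + 2 ≤ ml - PySem.Str.len (PySem.Str.join ", " es)) := by omega
      rw [if_neg h, if_neg hcond]
      simp

-- ===== VERDICT (by name: the statement is the Claim_ definition above) =====
theorem optimize_prompt_length_py_spec : Claim_equal_optimize_prompt_length_py := by
  intro prompt max_length _
  unfold Spec_optimize_prompt_length_py optimize_prompt_length_py optimize_prompt_length_py_alt
  by_cases hshort : PySem.Str.len prompt ≤ max_length
  · rw [if_pos hshort, if_pos hshort]
  · rw [if_neg hshort, if_neg hshort]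
    dsimp only
    generalize hS : ((PySem.Str.split? prompt ",").getD []).map PySem.Str.strip = S
    have hSne : S ≠ [] := by
      rw [← hS]
      have : PySem.Str.split? prompt "," =
          some ((PySem.Chars.splitOn prompt.toList (",".toList)).map String.ofList) := by
        simp [PySem.Str.split?, PySem.Chars.split?]
      rw [this]
      simp only [Option.getD_some, ne_eq, List.map_eq_nil_iff]
      exact pvSplitOnNeNil _ _
    rw [PySem.List.slice_to S (by norm_num), PySem.List.slice_from S (by norm_num)]
    have hes : List.take (Int.toNat 3) S ≠ [] := by
      cases S with
      | nil => exact absurd rfl hSne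
      | cons a t => simp
    rw [pvFoldCosts, List.nil_append, pvCountEqNFit, sub_zero]
    rw [PySem.List.slice_to _ (Int.natCast_nonneg _), Int.toNat_natCast]
    exact pvLoopAEq (List.drop (Int.toNat 3) S) _ hes max_length
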